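-- pv_equiv track=rewrite | github.com/16yo/DM | rgr/rgr_3/perm_long.py | make_perm
-- ===== SOURCE A (Python) =====
-- N = 6
--
-- def make_perm(s: str):
--     m = dict({})
--
--     for i in range(1, N + 1):
--         c = str(i)
--         j = s.find(c)
--         if j != -1:
--             if j < len(s) - 1:
--                 m.update({ c : s[s.find(c) + 1]})
--             else:
--                 m.update({ c : s[0] })
--         else:
--             m.update({ c : c })
--     return m
-- ===== SOURCE B (Python) =====
-- N = 6
--
-- def make_perm(s: str):
--     # One pass over s building a successor index (first occurrence wins,
--     # last position wraps to s[0]), then one pass over the digits.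
--     nxt = {}
--     for i, ch in enumerate(s):
--         if ch not in nxt:
--             nxt[ch] = s[i + 1] if i + 1 < len(s) else s[0]
--     return {c: nxt.get(c, c) for c in "123456"}
-- ===== Notes on version B (the rewrite author's own statement) =====
-- stated objective: alternative
-- what changed: Replaces the six repeated s.find scans (and a second find per hit) with a single left-to-right pass that builds a first-occurrence successor map with wrap-around to the first character, followed by one lookup per digit.
import Mathlib
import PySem

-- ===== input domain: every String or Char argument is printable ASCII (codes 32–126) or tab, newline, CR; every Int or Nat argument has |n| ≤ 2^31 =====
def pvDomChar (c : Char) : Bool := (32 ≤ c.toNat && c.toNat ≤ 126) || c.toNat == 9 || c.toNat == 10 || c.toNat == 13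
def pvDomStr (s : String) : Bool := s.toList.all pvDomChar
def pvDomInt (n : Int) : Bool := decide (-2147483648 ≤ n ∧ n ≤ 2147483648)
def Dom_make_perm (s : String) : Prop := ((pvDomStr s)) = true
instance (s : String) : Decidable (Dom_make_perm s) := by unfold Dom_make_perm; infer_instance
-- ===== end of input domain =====

-- B replaces the six repeated find scans with a single successor-building pass over s plus a digit lookup loop (alternative decomposition, same result).

-- ===== PORT A =====
def make_perm (s : String) : List (String × String) :=
  ((PySem.List.pyRange 1 (6 + 1) 1).foldl (fun m i =>
    let c := PySem.Int.toStr i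
    let j := PySem.Str.find s c
    if j ≠ -1 then
      if j < PySem.Str.len s - 1 then
        m.insert c (String.singleton ((PySem.Str.pyGet? s (PySem.Str.find s c + 1)).getD ' '))
      else
        m.insert c (String.singleton ((PySem.Str.pyGet? s 0).getD ' '))
    else
      m.insert c c) PySem.Dict.empty).items

-- ===== PORT B =====
def make_perm_alt (s : String) : List (String × String) :=
  let nxt : PySem.Dict String String :=
    (PySem.List.enumerate s.toList 0).foldl (fun d p =>
      if d.contains (String.singleton p.2) = false then
        d.insert (String.singleton p.2)
          (if p.1 + 1 < PySem.Str.len s then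
            String.singleton ((PySem.Str.pyGet? s (p.1 + 1)).getD ' ')
          else
            String.singleton ((PySem.Str.pyGet? s 0).getD ' '))
      else d) PySem.Dict.empty
  (("123456".toList).foldl (fun m c =>
    m.insert (String.singleton c) (nxt.getD (String.singleton c) (String.singleton c)))
    PySem.Dict.empty).items

-- ===== PRECONDITION & SPEC =====
def Spec_make_perm (s : String) (out : List (String × String)) : Prop := out = make_perm_alt s
instance (s : String) (out : List (String × String)) : Decidable (Spec_make_perm s out) := by unfold Spec_make_perm; infer_instance

-- ===== CLAIM (what is proved, stated in full; the proofs are below) =====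
def Claim_equal_make_perm : Prop := ∀ (s : String), Dom_make_perm s → Spec_make_perm s (make_perm s)

-- ===== LEMMAS AND PROOFS =====

theorem singleton_ne (c d : Char) (h : c ≠ d) : String.singleton c ≠ String.singleton d := by
  intro he; apply h
  have := congrArg String.toList he
  simpa using this

-- find of a single character = first index of that character (or -1)
theorem find_go_singleton (c : Char) (cs : List Char) (k : ℕ) :
    PySem.Chars.find.go [c] cs k = if c ∈ cs then ((k : ℤ) + cs.idxOf c) else -1 := by
  induction cs generalizing k with
  | nil => simp [PySem.Chars.find.go]
  | cons x cs ih =>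
    rw [PySem.Chars.find.go]
    by_cases hx : c = x
    · subst hx
      simp [List.isPrefixOf]
    · have hpre : ([c].isPrefixOf (x :: cs)) = false := by
        simp [List.isPrefixOf, hx]
      rw [hpre]
      have hxc : (x == c) = false := by simp; exact Ne.symm hx
      simp only [Bool.false_eq_true, if_false, ih]
      simp only [List.mem_cons, hx, false_or, List.idxOf_cons, hxc, cond_false]
      split
      · push_cast; ring
      · rfl

theorem find_singleton (s : String) (c : Char) :
    PySem.Str.find s (String.singleton c) = if c ∈ s.toList then ((s.toList.idxOf c : ℕ) : ℤ) else -1 := by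
  rw [PySem.Str.find_eq]
  have h1 : (String.singleton c).toList = [c] := by simp
  rw [h1]
  unfold PySem.Chars.find
  rw [find_go_singleton]
  split <;> simp

-- characterisation of the successor dict built by B's first pass
theorem nxt_get (v : ℤ → String) (c : Char) (cs : List Char) (k : ℤ) (d : PySem.Dict String String) :
    ((PySem.List.enumerate cs k).foldl (fun d p =>
        if d.contains (String.singleton p.2) = false then d.insert (String.singleton p.2) (v p.1)
        else d) d).get? (String.singleton c)
    = if d.contains (String.singleton c) = true then d.get? (String.singleton c)
      else if c ∈ cs then some (v (k + cs.idxOf c)) else none := by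
  induction cs generalizing k d with
  | nil =>
    simp only [PySem.List.enumerate, List.foldl_nil, List.not_mem_nil, if_false]
    rw [PySem.Dict.contains_eq_isSome_get?]
    cases h : d.get? (String.singleton c) <;> simp
  | cons x cs ih =>
    rw [PySem.List.enumerate, List.foldl_cons, ih]
    by_cases hx : c = x
    · subst hx
      by_cases hc : d.contains (String.singleton c) = true
      · simp [hc]
      · simp only [Bool.not_eq_true] at hc
        simp only [hc, Bool.false_eq_true, if_false, if_true,
          PySem.Dict.contains_insert_self, PySem.Dict.get?_insert_self, List.mem_cons, true_or,
          List.idxOf_cons, beq_self_eq_true]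
        norm_num
    · have hne := singleton_ne c x hx
      have hxc : (x == c) = false := by simp; exact Ne.symm hx
      have hcontains : ∀ w, ((d.insert (String.singleton x) w).contains (String.singleton c))
          = d.contains (String.singleton c) := by
        intro w
        rw [PySem.Dict.contains_insert]
        simp [hne]
      have hget : ∀ w, ((d.insert (String.singleton x) w).get? (String.singleton c))
          = d.get? (String.singleton c) := by
        intro w
        exact PySem.Dict.get?_insert_of_ne d w hne
      by_cases hdx : d.contains (String.singleton x) = false
      · rw [if_pos hdx, hcontains, hget]
        simp only [List.mem_cons, hx, false_or, List.idxOf_cons, hxc, cond_false]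
        split
        · rfl
        · split
          · congr 2
            push_cast
            ring
          · rfl
      · rw [if_neg hdx]
        simp only [List.mem_cons, hx, false_or, List.idxOf_cons, hxc, cond_false]
        split
        · rfl
        · split
          · congr 2
            push_cast
            ring
          · rfl

-- the successor value function of B's first pass
def bVal (s : String) (i : ℤ) : String :=
  if i + 1 < PySem.Str.len s then
    String.singleton ((PySem.Str.pyGet? s (i + 1)).getD ' ')
  else
    String.singleton ((PySem.Str.pyGet? s 0).getD ' ')

-- the per-digit value computed by A equals B's lookup in the successor dict
theorem digit_value (s : String) (c : Char) :
    (if PySem.Str.find s (String.singleton c) ≠ -1 then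
      if PySem.Str.find s (String.singleton c) < PySem.Str.len s - 1 then
        String.singleton ((PySem.Str.pyGet? s (PySem.Str.find s (String.singleton c) + 1)).getD ' ')
      else
        String.singleton ((PySem.Str.pyGet? s 0).getD ' ')
    else String.singleton c)
    = ((PySem.List.enumerate s.toList 0).foldl (fun d p =>
        if d.contains (String.singleton p.2) = false then
          d.insert (String.singleton p.2) (bVal s p.1)
        else d) PySem.Dict.empty).getD (String.singleton c) (String.singleton c) := by
  rw [PySem.Dict.getD, nxt_get (bVal s) c s.toList 0 PySem.Dict.empty]
  simp only [PySem.Dict.contains_empty, Bool.false_eq_true, if_false, zero_add]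
  rw [find_singleton]
  by_cases hm : c ∈ s.toList
  · simp only [hm, if_true, Option.getD_some]
    have hnn : ((s.toList.idxOf c : ℕ) : ℤ) ≠ -1 := by omega
    rw [if_pos hnn, bVal]
    exact if_congr (by omega) rfl rfl
  · simp only [hm, if_false, Option.getD_none]
    simp

-- fold of fresh insertions appends the key/value pairs in order
theorem foldl_insert_items {α : Type} (kf : α → String) (g : α → String) :
    ∀ (ks : List α) (d : PySem.Dict String String),
    (∀ a ∈ ks, d.contains (kf a) = false) → (ks.map kf).Nodup →
    (ks.foldl (fun m a => m.insert (kf a) (g a)) d).items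
      = d.items ++ ks.map (fun a => (kf a, g a)) := by
  intro ks
  induction ks with
  | nil => simp
  | cons a ks ih =>
    intro d hfresh hnd
    have hfa : d.contains (kf a) = false := hfresh a (by simp)
    have hins : (d.insert (kf a) (g a)).items = d.items ++ [(kf a, g a)] := by
      simp [PySem.Dict.insert, hfa]
    rw [List.foldl_cons, ih]
    · rw [hins]; simp
    · intro b hb
      rw [PySem.Dict.contains_insert]
      have : kf b ≠ kf a := by
        intro he
        simp only [List.map_cons, List.nodup_cons] at hnd
        exact hnd.1 (he ▸ List.mem_map_of_mem hb)
      simp [this, hfresh b (List.mem_cons_of_mem a hb)]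
    · simpa using hnd.of_cons

set_option maxHeartbeats 1000000 in
theorem ports_agree (s : String) : make_perm s = make_perm_alt s := by
  have hrange : PySem.List.pyRange 1 (6 + 1) 1 = [1, 2, 3, 4, 5, 6] := by decide
  have hdigits : ("123456".toList) = ['1', '2', '3', '4', '5', '6'] := by decide
  unfold make_perm make_perm_alt
  rw [hrange, hdigits]
  have hAfun : (fun (m : PySem.Dict String String) (i : ℤ) =>
      let c := PySem.Int.toStr i
      let j := PySem.Str.find s c
      if j ≠ -1 then
        if j < PySem.Str.len s - 1 then
          m.insert c (String.singleton ((PySem.Str.pyGet? s (PySem.Str.find s c + 1)).getD ' '))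
        else
          m.insert c (String.singleton ((PySem.Str.pyGet? s 0).getD ' '))
      else
        m.insert c c)
      = fun m i => m.insert (PySem.Int.toStr i)
          (if PySem.Str.find s (PySem.Int.toStr i) ≠ -1 then
            if PySem.Str.find s (PySem.Int.toStr i) < PySem.Str.len s - 1 then
              String.singleton ((PySem.Str.pyGet? s (PySem.Str.find s (PySem.Int.toStr i) + 1)).getD ' ')
            else
              String.singleton ((PySem.Str.pyGet? s 0).getD ' ')
          else PySem.Int.toStr i) := by
    funext m i
    show (if PySem.Str.find s (PySem.Int.toStr i) ≠ -1 then _ else _) = _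
    split_ifs <;> rfl
  have hBfun : (fun (d : PySem.Dict String String) (p : ℤ × Char) =>
      if d.contains (String.singleton p.2) = false then
        d.insert (String.singleton p.2)
          (if p.1 + 1 < PySem.Str.len s then
            String.singleton ((PySem.Str.pyGet? s (p.1 + 1)).getD ' ')
          else
            String.singleton ((PySem.Str.pyGet? s 0).getD ' '))
      else d)
      = fun d p =>
        if d.contains (String.singleton p.2) = false then
          d.insert (String.singleton p.2) (bVal s p.1)
        else d := by
    funext d p
    rw [bVal]
  rw [hAfun, hBfun]
  rw [foldl_insert_items (PySem.Int.toStr) _ [1, 2, 3, 4, 5, 6] PySem.Dict.empty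
        (by intro a _; exact PySem.Dict.contains_empty _) (by decide)]
  rw [foldl_insert_items (String.singleton) _ ['1', '2', '3', '4', '5', '6'] PySem.Dict.empty
        (by intro a _; exact PySem.Dict.contains_empty _) (by decide)]
  simp only [List.map_cons, List.map_nil]
  have e1 : PySem.Int.toStr 1 = String.singleton '1' := by decide
  have e2 : PySem.Int.toStr 2 = String.singleton '2' := by decide
  have e3 : PySem.Int.toStr 3 = String.singleton '3' := by decide
  have e4 : PySem.Int.toStr 4 = String.singleton '4' := by decide
  have e5 : PySem.Int.toStr 5 = String.singleton '5' := by decide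
  have e6 : PySem.Int.toStr 6 = String.singleton '6' := by decide
  rw [e1, e2, e3, e4, e5, e6]
  rw [digit_value s '1', digit_value s '2', digit_value s '3', digit_value s '4',
      digit_value s '5', digit_value s '6']

-- ===== VERDICT (by name: the statement is the Claim_ definition above) =====
theorem make_perm_spec : Claim_equal_make_perm := by
  intro s _
  unfold Spec_make_perm
  exact ports_agree s
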